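-- pv_equiv track=rewrite | github.com/NVIDIA/CUDALibrarySamples | cuTENSOR/python/cutensor/torch/einsum.py | _compute_target_tensor
-- ===== SOURCE A (Python) =====
-- def _compute_target_tensor(in0, in1, target, rest):
--     result = ""
--     rest = ''.join(rest) + target
--     for m in in0[:-1] + in1[:-1] + in1[-1] + in0[-1]:
--         if m in rest and not m in result:
--             result += m
--     # reorder target modes like target
--     result = list(result)
--     for i in range(len(result)):
--         if result[i] not in target: continue
--         for j in range(i):
--             if result[j] not in target: continue
--             if target.index(result[j]) > target.index(result[i]):
--                 result[i], result[j] = result[j], result[i]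
--     return ''.join(result)
-- ===== SOURCE B (Python) =====
-- def _compute_target_tensor(in0, in1, target, rest):
--     result = ""
--     rest = ''.join(rest) + target
--     for m in in0[:-1] + in1[:-1] + in1[-1] + in0[-1]:
--         if m in rest and not m in result:
--             result += m
--     # reorder: scatter the target-letters, listed in target's first-occurrence
--     # order, back into their original slots; non-target letters stay put
--     in_target = set(result) & set(target)
--     ordered = [c for c in dict.fromkeys(target) if c in in_target]
--     it = iter(ordered)
--     return ''.join(next(it) if c in in_target else c for c in result)
-- ===== Notes on version B (the rewrite author's own statement) =====
-- stated objective: simpler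
-- what changed: Replaces A's nested in-place swap loops (a bubble-style reorder over the mode string with repeated target.index calls) by a single pass over target that lists the wanted letters in target order and scatters them back into the original target slots; phase 1 (building the deduplicated mode string) is kept.
import Mathlib
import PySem

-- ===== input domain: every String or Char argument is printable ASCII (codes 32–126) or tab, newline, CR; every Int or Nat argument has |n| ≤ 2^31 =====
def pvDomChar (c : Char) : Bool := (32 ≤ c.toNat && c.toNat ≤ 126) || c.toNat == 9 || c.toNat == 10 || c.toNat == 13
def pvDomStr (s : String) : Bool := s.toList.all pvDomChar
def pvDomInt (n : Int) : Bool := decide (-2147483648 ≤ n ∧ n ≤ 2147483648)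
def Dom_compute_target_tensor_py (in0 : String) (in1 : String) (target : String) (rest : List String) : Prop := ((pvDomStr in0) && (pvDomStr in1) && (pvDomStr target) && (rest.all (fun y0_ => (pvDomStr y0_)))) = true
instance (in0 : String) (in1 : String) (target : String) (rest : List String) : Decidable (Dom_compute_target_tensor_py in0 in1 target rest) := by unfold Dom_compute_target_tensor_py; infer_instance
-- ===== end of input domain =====

-- B replaces A's quadratic in-place swap reordering by a single pass over `target`
-- that lists the wanted letters in target order and scatters them back (objective: simpler).

-- ===== PORT A =====
-- phase 1 (shared python text in Source A and Source B): dedup the modes that occur in rest+target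
def ctpPhase1 (ms : List Char) (restAll : List Char) : List Char :=
  ms.foldl (fun res m => if m ∈ restAll ∧ m ∉ res then res ++ [m] else res) []

-- inner loop body: for j in range(i): swap result[i], result[j] if out of target order
def ctpInnerStep (tgt : List Char) (i : Nat) (r : List Char) (j : Nat) : List Char :=
  let cj := r.getD j ' '
  if cj ∈ tgt then
    if tgt.idxOf cj > tgt.idxOf (r.getD i ' ') then
      let ci := r.getD i ' '
      (r.set i cj).set j ci
    else r
  else r

def ctpOuterStep (tgt : List Char) (r : List Char) (i : Nat) : List Char :=
  if r.getD i ' ' ∈ tgt then (List.range i).foldl (ctpInnerStep tgt i) r else r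

def ctpSort (tgt r : List Char) : List Char :=
  (List.range r.length).foldl (ctpOuterStep tgt) r

def compute_target_tensor_py (in0 : String) (in1 : String) (target : String) (rest : List String) : String :=
  let i0 := in0.toList
  let i1 := in1.toList
  let tgt := target.toList
  let restAll := PySem.Chars.join [] (rest.map String.toList) ++ tgt
  match PySem.List.pyGet? i1 (-1), PySem.List.pyGet? i0 (-1) with
  | some l1, some l0 =>
    let ms := PySem.List.slice i0 none (some (-1)) ++ PySem.List.slice i1 none (some (-1)) ++ [l1] ++ [l0]
    String.ofList (ctpSort tgt (ctpPhase1 ms restAll))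
  | _, _ => ""   -- unreachable under Pre_ (IndexError in Python)

-- ===== PORT B =====
-- phase 1, B's own transliteration of the (textually shared) dedup loop in Source B
def ctpPhase1B (ms : List Char) (restAll : List Char) : List Char :=
  ms.foldl (fun res m => if m ∈ restAll ∧ m ∉ res then res ++ [m] else res) []

-- scatter: put the next reordered target letter at each target slot, keep others
def ctpScatter (inT : PySem.Set Char) : List Char → List Char → List Char
  | [], _ => []
  | c :: r, os =>
    if PySem.Set.contains inT c then os.headD c :: ctpScatter inT r os.tail
    else c :: ctpScatter inT r os

def compute_target_tensor_py_alt (in0 : String) (in1 : String) (target : String) (rest : List String) : String :=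
  let i0 := in0.toList
  let i1 := in1.toList
  let tgt := target.toList
  let restAll := PySem.Chars.join [] (rest.map String.toList) ++ tgt
  match PySem.List.pyGet? i1 (-1) with
  | none => ""   -- unreachable under Pre_ (IndexError in Python)
  | some l1 =>
    match PySem.List.pyGet? i0 (-1) with
    | none => ""   -- unreachable under Pre_ (IndexError in Python)
    | some l0 =>
      let ms := PySem.List.slice i0 none (some (-1)) ++ PySem.List.slice i1 none (some (-1)) ++ [l1] ++ [l0]
      let res := ctpPhase1B ms restAll
      let inT := PySem.Set.inter (PySem.Set.ofList res) (PySem.Set.ofList tgt)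
      let ordered := (PySem.List.dedup tgt).filter (fun c => PySem.Set.contains inT c)
      String.ofList (ctpScatter inT res ordered)

-- ===== PRECONDITION & SPEC =====
-- Pre_ excludes exactly the inputs where Python A raises IndexError: in0[-1] / in1[-1] on an empty string.
def Pre_compute_target_tensor_py (in0 : String) (in1 : String) (target : String) (rest : List String) : Prop :=
  in0.toList ≠ [] ∧ in1.toList ≠ []
instance (in0 : String) (in1 : String) (target : String) (rest : List String) : Decidable (Pre_compute_target_tensor_py in0 in1 target rest) := by unfold Pre_compute_target_tensor_py; infer_instance

def pvWitness_compute_target_tensor_py : String × String × String × List String := ("ik", "kj", "ij", [])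

def Spec_compute_target_tensor_py (in0 : String) (in1 : String) (target : String) (rest : List String) (out : String) : Prop := out = compute_target_tensor_py_alt in0 in1 target rest
instance (in0 : String) (in1 : String) (target : String) (rest : List String) (out : String) : Decidable (Spec_compute_target_tensor_py in0 in1 target rest out) := by unfold Spec_compute_target_tensor_py; infer_instance

-- ===== CLAIM (what is proved, stated in full; the proofs are below) =====
def Claim_equal_compute_target_tensor_py : Prop := ∀ (in0 : String) (in1 : String) (target : String) (rest : List String), Dom_compute_target_tensor_py in0 in1 target rest → Pre_compute_target_tensor_py in0 in1 target rest → Spec_compute_target_tensor_py in0 in1 target rest (compute_target_tensor_py in0 in1 target rest)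

-- ===== LEMMAS AND PROOFS =====

-- -------- abstract model of A's reorder --------

-- one inner loop as a single left-to-right pass with a carry (the value at slot i)
def innerPass (tgt : List Char) : List Char → Char → List Char × Char
  | [], x => ([], x)
  | a :: p, x =>
    if a ∈ tgt ∧ tgt.idxOf a > tgt.idxOf x then
      let r := innerPass tgt p a; (x :: r.1, r.2)
    else
      let r := innerPass tgt p x; (a :: r.1, r.2)

-- the outer loop as a left-to-right pass building a processed prefix
def outerGo (tgt : List Char) : List Char → List Char → List Char
  | acc, [] => acc
  | acc, c :: todo =>
    if c ∈ tgt then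
      let r := innerPass tgt acc c
      outerGo tgt (r.1 ++ [r.2]) todo
    else outerGo tgt (acc ++ [c]) todo

-- -------- canonical form --------

def scat (tgt : List Char) : List Char → List Char → List Char
  | [], _ => []
  | c :: l, vs => if c ∈ tgt then vs.headD c :: scat tgt l vs.tail else c :: scat tgt l vs

def ordOf (tgt l : List Char) : List Char :=
  (PySem.List.dedup tgt).filter (fun c => decide (c ∈ l))

def canon (tgt l : List Char) : List Char := scat tgt l (ordOf tgt l)

def insort (tgt : List Char) (c : Char) : List Char → List Char
  | [] => [c]
  | b :: s => if tgt.idxOf b > tgt.idxOf c then c :: b :: s else b :: insort tgt c s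

def tfilter (tgt l : List Char) : List Char := l.filter (fun b => decide (b ∈ tgt))

-- -------- small helpers --------

theorem getD_mid {α : Type} (p : List α) (x : α) (s : List α) (d : α) :
    (p ++ x :: s).getD p.length d = x := by
  induction p with
  | nil => rfl
  | cons a p ih => simpa using ih

theorem set_mid {α : Type} (p : List α) (x v : α) (s : List α) :
    (p ++ x :: s).set p.length v = p ++ v :: s := by
  induction p with
  | nil => rfl
  | cons a p ih => simpa using ih

-- -------- bridge: index loops = passes --------

theorem innerStep_succ (tgt : List Char) (i j : Nat) (a : Char) (s : List Char) :
    ctpInnerStep tgt (i + 1) (a :: s) (j + 1) = a :: ctpInnerStep tgt i s j := by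
  simp only [ctpInnerStep, List.getD_cons_succ, List.set_cons_succ]
  split_ifs <;> rfl

theorem innerStep_shift (tgt : List Char) (i : Nat) :
    ∀ (ks : List Nat) (a : Char) (s : List Char),
    (ks.map Nat.succ).foldl (ctpInnerStep tgt (i + 1)) (a :: s)
      = a :: ks.foldl (ctpInnerStep tgt i) s := by
  intro ks
  induction ks with
  | nil => intro a s; rfl
  | cons k ks ih =>
    intro a s
    simp only [List.map_cons, List.foldl_cons, innerStep_succ]
    exact ih a _

theorem inner_bridge (tgt : List Char) :
    ∀ (p : List Char) (x : Char) (suf : List Char),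
    (List.range p.length).foldl (ctpInnerStep tgt p.length) (p ++ x :: suf)
      = (innerPass tgt p x).1 ++ (innerPass tgt p x).2 :: suf := by
  intro p
  induction p with
  | nil => intro x suf; rfl
  | cons a p ih =>
    intro x suf
    rw [List.length_cons, List.range_succ_eq_map, List.foldl_cons]
    have hstep : ctpInnerStep tgt (p.length + 1) (a :: (p ++ x :: suf)) 0
        = if a ∈ tgt ∧ tgt.idxOf a > tgt.idxOf x
          then x :: (p ++ a :: suf) else a :: (p ++ x :: suf) := by
      simp only [ctpInnerStep, List.getD_cons_zero,
        List.getD_cons_succ, getD_mid p x suf ' ']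
      by_cases h1 : a ∈ tgt
      · by_cases h2 : tgt.idxOf a > tgt.idxOf x
        · simp only [if_pos h1, if_pos h2, if_pos (And.intro h1 h2), List.set_cons_succ,
            set_mid p x a suf, List.set_cons_zero]
        · simp [h1, h2]
      · simp [h1]
    rw [List.cons_append, hstep]
    by_cases h : a ∈ tgt ∧ tgt.idxOf a > tgt.idxOf x
    · rw [if_pos h, innerStep_shift, ih a suf]
      simp only [innerPass, if_pos h, List.cons_append]
    · rw [if_neg h, innerStep_shift, ih x suf]
      simp only [innerPass, if_neg h, List.cons_append]

theorem innerPass_length (tgt : List Char) :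
    ∀ (p : List Char) (x : Char), (innerPass tgt p x).1.length = p.length := by
  intro p
  induction p with
  | nil => intro x; rfl
  | cons a p ih =>
    intro x
    simp only [innerPass]
    split_ifs <;> simp [ih]

theorem outer_bridge (tgt : List Char) :
    ∀ (todo acc : List Char),
    (List.range' acc.length todo.length).foldl (ctpOuterStep tgt) (acc ++ todo)
      = outerGo tgt acc todo := by
  intro todo
  induction todo with
  | nil => intro acc; simp [outerGo]
  | cons c todo ih =>
    intro acc
    rw [List.length_cons, List.range'_succ, List.foldl_cons]
    have hstep : ctpOuterStep tgt (acc ++ c :: todo) acc.length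
        = if c ∈ tgt
          then (innerPass tgt acc c).1 ++ (innerPass tgt acc c).2 :: todo
          else acc ++ c :: todo := by
      simp only [ctpOuterStep, getD_mid acc c todo ' ']
      by_cases h : c ∈ tgt
      · have := inner_bridge tgt acc c todo
        simp only [if_pos h]
        exact this
      · simp [h]
    rw [hstep]
    by_cases h : c ∈ tgt
    · rw [if_pos h]
      have hlen : acc.length + 1 = ((innerPass tgt acc c).1 ++ [(innerPass tgt acc c).2]).length := by
        simp [innerPass_length]
      have hassoc : (innerPass tgt acc c).1 ++ (innerPass tgt acc c).2 :: todo
          = ((innerPass tgt acc c).1 ++ [(innerPass tgt acc c).2]) ++ todo := by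
        rw [List.append_cons]
      rw [hassoc, hlen, ih]
      simp only [outerGo, if_pos h]
    · rw [if_neg h]
      have : acc ++ c :: todo = (acc ++ [c]) ++ todo := by rw [List.append_cons]
      rw [this, show acc.length + 1 = (acc ++ [c]).length by simp, ih]
      simp only [outerGo, if_neg h]

theorem ctpSort_eq_outerGo (tgt r : List Char) : ctpSort tgt r = outerGo tgt [] r := by
  have := outer_bridge tgt r []
  simpa [ctpSort, List.range_eq_range'] using this

-- -------- scat lemmas --------

theorem scat_filter (tgt : List Char) :
    ∀ (l vs : List Char), (∀ v ∈ vs, v ∈ tgt) → vs.length = (tfilter tgt l).length →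
    tfilter tgt (scat tgt l vs) = vs := by
  intro l
  induction l with
  | nil =>
    intro vs _ hlen
    cases vs with
    | nil => rfl
    | cons v vs => simp [tfilter] at hlen
  | cons c l ih =>
    intro vs hmem hlen
    by_cases hc : c ∈ tgt
    · have hlen' : vs.length = (tfilter tgt l).length + 1 := by
        simpa [tfilter, hc] using hlen
      cases vs with
      | nil => simp at hlen'
      | cons v vs =>
        have hv : v ∈ tgt := hmem v (by simp)
        simp only [scat, if_pos hc, List.headD_cons, List.tail_cons]
        have := ih vs (fun w hw => hmem w (by simp [hw])) (by simpa using hlen')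
        simp [tfilter, hv] at this ⊢
        exact this
    · simp only [scat, if_neg hc]
      have := ih vs hmem (by simpa [tfilter, hc] using hlen)
      simp [tfilter, hc] at this ⊢
      exact this

theorem scat_last_mem (tgt : List Char) (u v : Char) (hu : u ∈ tgt) (hv : v ∈ tgt) :
    ∀ (l vs : List Char), vs.length = (tfilter tgt (l ++ [u])).length →
    scat tgt (l ++ [u]) vs = scat tgt (l ++ [v]) vs := by
  intro l
  induction l with
  | nil =>
    intro vs hlen
    have : vs.length = 1 := by simpa [tfilter, hu] using hlen
    cases vs with
    | nil => simp at this
    | cons w ws => simp [scat, hu, hv]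
  | cons c l ih =>
    intro vs hlen
    by_cases hc : c ∈ tgt
    · have hlen' : vs.length = (tfilter tgt (l ++ [u])).length + 1 := by
        simpa [tfilter, hc] using hlen
      cases vs with
      | nil => simp at hlen'
      | cons w ws =>
        simp only [List.cons_append, scat, if_pos hc, List.headD_cons, List.tail_cons]
        rw [ih ws (by simpa using hlen')]
    · simp only [List.cons_append, scat, if_neg hc]
      rw [ih vs (by simpa [tfilter, hc] using hlen)]

theorem scat_append_nontgt (tgt : List Char) (c : Char) (hc : c ∉ tgt) :
    ∀ (l vs : List Char), scat tgt (l ++ [c]) vs = scat tgt l vs ++ [c] := by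
  intro l
  induction l with
  | nil => intro vs; simp [scat, hc]
  | cons d l ih =>
    intro vs
    by_cases hd : d ∈ tgt
    · simp only [List.cons_append, scat, if_pos hd, ih]
    · simp only [List.cons_append, scat, if_neg hd, ih]

theorem scat_scat (tgt : List Char) (c : Char) :
    ∀ (l vs : List Char), (∀ v ∈ vs, v ∈ tgt) → vs.length = (tfilter tgt l).length →
    ∀ ws, ws.length = (tfilter tgt (l ++ [c])).length →
    scat tgt (scat tgt l vs ++ [c]) ws = scat tgt (l ++ [c]) ws := by
  intro l
  induction l with
  | nil => intro vs _ hlen ws _; cases vs with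
    | nil => rfl
    | cons v vs => simp [tfilter] at hlen
  | cons d l ih =>
    intro vs hmem hlen ws hws
    by_cases hd : d ∈ tgt
    · have hlen' : vs.length = (tfilter tgt l).length + 1 := by
        simpa [tfilter, hd] using hlen
      have hws' : ws.length = (tfilter tgt (l ++ [c])).length + 1 := by
        simpa [tfilter, hd] using hws
      cases vs with
      | nil => simp at hlen'
      | cons v vs =>
        cases ws with
        | nil => simp at hws'
        | cons w ws =>
          have hv : v ∈ tgt := hmem v (by simp)
          simp only [scat, if_pos hd, List.headD_cons, List.tail_cons, List.cons_append,
            if_pos hv]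
          rw [ih vs (fun x hx => hmem x (by simp [hx])) (by simpa using hlen')
              ws (by simpa using hws')]
    · simp only [scat, if_neg hd, List.cons_append]
      rw [ih vs hmem (by simpa [tfilter, hd] using hlen) ws (by simpa [tfilter, hd] using hws)]

-- -------- key-order facts --------

theorem dedup_append_singleton (l : List Char) (c : Char) :
    PySem.List.dedup (l ++ [c])
      = if c ∈ PySem.List.dedup l then PySem.List.dedup l else PySem.List.dedup l ++ [c] := by
  simp only [PySem.List.dedup_eq_ofList, PySem.Set.ofList_append_singleton]
  exact PySem.Set.add_eq_ite ..

theorem dedup_pairwise_idxOf (l : List Char) :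
    (PySem.List.dedup l).Pairwise (fun u v => l.idxOf u < l.idxOf v) := by
  induction l using List.reverseRecOn with
  | nil => simp [PySem.List.dedup]
  | append_singleton l c ih =>
    have hmemd : ∀ x, x ∈ PySem.List.dedup l ↔ x ∈ l := fun x => PySem.List.mem_dedup l x
    have hidx : ∀ x ∈ PySem.List.dedup l, (l ++ [c]).idxOf x = l.idxOf x := by
      intro x hx
      exact List.idxOf_append_of_mem ((hmemd x).mp hx)
    rw [dedup_append_singleton]
    by_cases hc : c ∈ PySem.List.dedup l
    · rw [if_pos hc]
      exact ih.imp_of_mem (fun {a b} ha hb h => by rw [hidx a ha, hidx b hb]; exact h)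
    · rw [if_neg hc]
      have hcl : c ∉ l := fun h => hc ((hmemd c).mpr h)
      rw [List.pairwise_append]
      refine ⟨ih.imp_of_mem (fun {a b} ha hb h => by rw [hidx a ha, hidx b hb]; exact h), by simp, ?_⟩
      intro a ha b hb
      rw [List.mem_singleton] at hb
      subst hb
      rw [hidx a ha, List.idxOf_append_of_notMem hcl]
      have : l.idxOf a < l.length := List.idxOf_lt_length_of_mem ((hmemd a).mp ha)
      omega

theorem idxOf_inj (tgt : List Char) {u v : Char} (hu : u ∈ tgt) (hv : v ∈ tgt)
    (h : tgt.idxOf u = tgt.idxOf v) : u = v := by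
  have h1 : tgt.idxOf u < tgt.length := List.idxOf_lt_length_of_mem hu
  have h2 : tgt.idxOf v < tgt.length := List.idxOf_lt_length_of_mem hv
  have e1 : tgt[tgt.idxOf u] = u := List.getElem_idxOf h1
  have e2 : tgt[tgt.idxOf v] = v := List.getElem_idxOf h2
  rw [← e1, ← e2]
  simp [h]

theorem insort_front (tgt : List Char) (c : Char) (s : List Char)
    (h : ∀ b ∈ s, tgt.idxOf b > tgt.idxOf c) : insort tgt c s = c :: s := by
  cases s with
  | nil => rfl
  | cons b s => simp [insort, h b (by simp)]

theorem insort_filter (tgt : List Char) (c : Char) (a : List Char) (hca : c ∉ a) :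
    ∀ (D : List Char), D.Pairwise (fun u v => tgt.idxOf u < tgt.idxOf v) → c ∈ D →
    insort tgt c (D.filter (fun b => decide (b ∈ a)))
      = D.filter (fun b => decide (b ∈ a ++ [c])) := by
  intro D
  induction D with
  | nil => intro _ h; simp at h
  | cons d D ih =>
    intro hpw hcD
    have hd : ∀ b ∈ D, tgt.idxOf d < tgt.idxOf b := fun b hb => List.rel_of_pairwise_cons hpw hb
    have hpw' := hpw.tail
    by_cases hdc : d = c
    · subst hdc
      have hfd : ∀ b ∈ D.filter (fun b => decide (b ∈ a)), tgt.idxOf b > tgt.idxOf d := by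
        intro b hb
        exact hd b (List.mem_of_mem_filter hb)
      have hDne : ∀ b ∈ D, b ≠ d := by
        intro b hb he
        subst he
        exact lt_irrefl _ (hd b hb)
      simp only [List.filter_cons]
      rw [if_neg (by simp [hca]), insort_front tgt d _ hfd, if_pos (by simp)]
      congr 1
      apply List.filter_congr
      intro b hb
      simp [hDne b hb]
    · have hcD' : c ∈ D := by
        cases hcD with
        | head => exact absurd rfl hdc
        | tail _ h => exact h
      have hdlt : tgt.idxOf d < tgt.idxOf c := hd c hcD'
      by_cases hda : d ∈ a
      · simp only [List.filter_cons]
        rw [if_pos (by simp [hda]), if_pos (by simp [hda])]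
        simp only [insort, if_neg (by omega : ¬ tgt.idxOf d > tgt.idxOf c)]
        rw [ih hpw' hcD']
      · simp only [List.filter_cons]
        rw [if_neg (by simp [hda]), if_neg (by simp [hda, hdc])]
        exact ih hpw' hcD' 

-- -------- ordOf facts --------

theorem mem_ordOf (tgt l : List Char) (x : Char) : x ∈ ordOf tgt l ↔ x ∈ tgt ∧ x ∈ l := by
  simp [ordOf, List.mem_filter]

theorem ordOf_length (tgt l : List Char) (hl : l.Nodup) :
    (ordOf tgt l).length = (tfilter tgt l).length := by
  have h1 : (ordOf tgt l).Nodup := (PySem.List.nodup_dedup tgt).filter _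
  have h2 : (tfilter tgt l).Nodup := hl.filter _
  have hperm : (ordOf tgt l).Perm (tfilter tgt l) := by
    rw [List.perm_ext_iff_of_nodup h1 h2]
    intro x
    rw [mem_ordOf]
    simp [tfilter, List.mem_filter, and_comm]
  exact hperm.length_eq

theorem ordOf_pairwise (tgt l : List Char) :
    (ordOf tgt l).Pairwise (fun u v => tgt.idxOf u < tgt.idxOf v) := by
  exact (dedup_pairwise_idxOf tgt).filter _

theorem ordOf_append_nontgt (tgt l : List Char) (c : Char) (hc : c ∉ tgt) :
    ordOf tgt (l ++ [c]) = ordOf tgt l := by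
  unfold ordOf
  apply List.filter_congr
  intro b hb
  have hb' : b ∈ tgt := (PySem.List.mem_dedup tgt b).mp hb
  have : b ≠ c := fun h => hc (h ▸ hb')
  simp [this]

theorem ordOf_append_tgt (tgt a : List Char) (c : Char) (hc : c ∈ tgt) (hca : c ∉ a) :
    insort tgt c (ordOf tgt a) = ordOf tgt (a ++ [c]) := by
  unfold ordOf
  exact insort_filter tgt c a hca (PySem.List.dedup tgt) (dedup_pairwise_idxOf tgt)
    ((PySem.List.mem_dedup tgt c).mpr hc)

-- -------- innerPass spec --------

theorem innerPass_spec (tgt : List Char) :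
    ∀ (acc : List Char) (c : Char), c ∈ tgt →
    (tfilter tgt acc).Pairwise (fun u v => tgt.idxOf u < tgt.idxOf v) →
    (∀ b ∈ tfilter tgt acc, tgt.idxOf b ≠ tgt.idxOf c) →
    (innerPass tgt acc c).1 ++ [(innerPass tgt acc c).2]
      = scat tgt (acc ++ [c]) (insort tgt c (tfilter tgt acc)) := by
  intro acc
  induction acc with
  | nil =>
    intro c hc _ _
    simp [innerPass, tfilter, insort, scat, hc]
  | cons a acc ih =>
    intro c hc hpw hne
    by_cases ha : a ∈ tgt
    · have hfa : tfilter tgt (a :: acc) = a :: tfilter tgt acc := by simp [tfilter, ha]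
      rw [hfa] at hpw hne
      have hpw' := hpw.tail
      have hrel : ∀ b ∈ tfilter tgt acc, tgt.idxOf a < tgt.idxOf b :=
        fun b hb => List.rel_of_pairwise_cons hpw hb
      by_cases hgt : tgt.idxOf a > tgt.idxOf c
      · -- swap branch
        simp only [innerPass, if_pos (And.intro ha hgt)]
        have hin : insort tgt c (a :: tfilter tgt acc) = c :: a :: tfilter tgt acc := by
          simp [insort, hgt]
        rw [hfa, hin]
        simp only [List.cons_append, scat, if_pos ha, List.headD_cons, List.tail_cons]
        have hne' : ∀ b ∈ tfilter tgt acc, tgt.idxOf b ≠ tgt.idxOf a :=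
          fun b hb => ne_of_gt (hrel b hb)
        have := ih a ha hpw' hne'
        rw [insort_front tgt a _ hrel] at this
        have hlen : (a :: tfilter tgt acc).length = (tfilter tgt (acc ++ [a])).length := by
          simp [tfilter, ha]
        rw [this, scat_last_mem tgt a c ha hc acc (a :: tfilter tgt acc) hlen]
      · -- no-swap branch
        have hand : ¬(a ∈ tgt ∧ tgt.idxOf a > tgt.idxOf c) := fun h => hgt h.2
        simp only [innerPass, if_neg hand]
        have hin : insort tgt c (a :: tfilter tgt acc) = a :: insort tgt c (tfilter tgt acc) := by
          simp [insort, hgt]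
        rw [hfa, hin]
        simp only [List.cons_append, scat, if_pos ha, List.headD_cons, List.tail_cons]
        rw [ih c hc hpw' (fun b hb => hne b (by simp [hb]))]
    · have hfa : tfilter tgt (a :: acc) = tfilter tgt acc := by simp [tfilter, ha]
      rw [hfa] at hpw hne ⊢
      have hand : ¬(a ∈ tgt ∧ tgt.idxOf a > tgt.idxOf c) := fun h => ha h.1
      simp only [innerPass, if_neg hand]
      simp only [List.cons_append, scat, if_neg ha]
      rw [ih c hc hpw hne]

-- -------- outer invariant --------

theorem tfilter_canon (tgt a : List Char) (ha : a.Nodup) :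
    tfilter tgt (canon tgt a) = ordOf tgt a := by
  exact scat_filter tgt a (ordOf tgt a)
    (fun v hv => ((mem_ordOf tgt a v).mp hv).1) (ordOf_length tgt a ha)

theorem outerGo_canon (tgt : List Char) :
    ∀ (todo a : List Char), (a ++ todo).Nodup →
    outerGo tgt (canon tgt a) todo = canon tgt (a ++ todo) := by
  intro todo
  induction todo with
  | nil => intro a _; simp [outerGo]
  | cons c todo ih =>
    intro a hnd
    have hnd' : ((a ++ [c]) ++ todo).Nodup := by rwa [← List.append_cons]
    have hsplit := List.nodup_append.mp hnd
    have ha : a.Nodup := hsplit.1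
    have hca : c ∉ a := fun h => hsplit.2.2 c h c (by simp) rfl
    have hac : (a ++ [c]).Nodup := (List.nodup_append.mp hnd').1
    rw [show a ++ c :: todo = (a ++ [c]) ++ todo from List.append_cons ..]
    by_cases hc : c ∈ tgt
    · simp only [outerGo, if_pos hc]
      have hspec := innerPass_spec tgt (canon tgt a) c hc
        (by rw [tfilter_canon tgt a ha]; exact ordOf_pairwise tgt a)
        (by rw [tfilter_canon tgt a ha]
            intro b hb he
            have hb' := (mem_ordOf tgt a b).mp hb
            exact hca ((idxOf_inj tgt hb'.1 hc he) ▸ hb'.2))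
      rw [tfilter_canon tgt a ha, ordOf_append_tgt tgt a c hc hca] at hspec
      have hs2 : scat tgt (canon tgt a ++ [c]) (ordOf tgt (a ++ [c]))
          = scat tgt (a ++ [c]) (ordOf tgt (a ++ [c])) := by
        have := scat_scat tgt c a (ordOf tgt a)
          (fun v hv => ((mem_ordOf tgt a v).mp hv).1) (ordOf_length tgt a ha)
          (ordOf tgt (a ++ [c])) (ordOf_length tgt (a ++ [c]) hac)
        simpa [canon] using this
      rw [hspec, hs2]
      exact ih (a ++ [c]) hnd'
    · simp only [outerGo, if_neg hc]
      have hstep : canon tgt a ++ [c] = canon tgt (a ++ [c]) := by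
        unfold canon
        rw [ordOf_append_nontgt tgt a c hc, scat_append_nontgt tgt c hc]
      rw [hstep]
      exact ih (a ++ [c]) hnd'

theorem ctpSort_canon (tgt r : List Char) (hr : r.Nodup) : ctpSort tgt r = canon tgt r := by
  rw [ctpSort_eq_outerGo]
  have h0 : ([] : List Char) = canon tgt [] := rfl
  calc outerGo tgt [] r = outerGo tgt (canon tgt []) r := by rw [← h0]
    _ = canon tgt ([] ++ r) := outerGo_canon tgt r [] (by simpa using hr)
    _ = canon tgt r := by simp

-- -------- phase 1 nodup --------

theorem phase1_go_nodup (restAll : List Char) :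
    ∀ (ms res : List Char), res.Nodup →
    (ms.foldl (fun res m => if m ∈ restAll ∧ m ∉ res then res ++ [m] else res) res).Nodup := by
  intro ms
  induction ms with
  | nil => intro res h; exact h
  | cons m ms ih =>
    intro res h
    simp only [List.foldl_cons]
    by_cases hm : m ∈ restAll ∧ m ∉ res
    · rw [if_pos hm]
      refine ih _ ?_
      rw [List.nodup_append]
      refine ⟨h, List.nodup_singleton m, fun x hx b hb => ?_⟩
      rw [List.mem_singleton] at hb
      subst hb
      exact fun he => hm.2 (he ▸ hx)
    · rw [if_neg hm]
      exact ih _ h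

theorem phase1_nodup (ms restAll : List Char) : (ctpPhase1 ms restAll).Nodup := by
  exact phase1_go_nodup restAll ms [] List.nodup_nil

-- -------- B equals canonical --------

theorem scatter_go_eq_scat (tgt res : List Char) :
    ∀ (l os : List Char), (∀ c ∈ l, c ∈ res) →
    ctpScatter (PySem.Set.inter (PySem.Set.ofList res) (PySem.Set.ofList tgt)) l os
      = scat tgt l os := by
  intro l
  induction l with
  | nil => intro os _; rfl
  | cons c l ih =>
    intro os hmem
    have hc : c ∈ res := hmem c (by simp)
    have hcontains : PySem.Set.contains
        (PySem.Set.inter (PySem.Set.ofList res) (PySem.Set.ofList tgt)) c = decide (c ∈ tgt) := by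
      by_cases ht : c ∈ tgt
      · simp only [decide_eq_true ht]
        rw [PySem.Set.contains_iff]
        rw [PySem.Set.mem_inter]
        exact ⟨by rwa [PySem.Set.mem_ofList], by rwa [PySem.Set.mem_ofList]⟩
      · simp only [decide_eq_false ht]
        rw [← Bool.not_eq_true, PySem.Set.contains_iff, PySem.Set.mem_inter]
        intro h
        exact ht ((PySem.Set.mem_ofList ..).mp h.2)
    simp only [ctpScatter, scat, hcontains]
    by_cases ht : c ∈ tgt
    · rw [if_pos (by simp [ht] : decide (c ∈ tgt) = true), if_pos ht,
        ih _ (fun x hx => hmem x (by simp [hx]))]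
    · rw [if_neg (by simp [ht] : ¬ decide (c ∈ tgt) = true), if_neg ht,
        ih _ (fun x hx => hmem x (by simp [hx]))]

theorem scatter_eq_scat (tgt res : List Char) :
    ctpScatter (PySem.Set.inter (PySem.Set.ofList res) (PySem.Set.ofList tgt)) res
        ((PySem.List.dedup tgt).filter (fun c =>
          PySem.Set.contains (PySem.Set.inter (PySem.Set.ofList res) (PySem.Set.ofList tgt)) c))
      = canon tgt res := by
  have hord : (PySem.List.dedup tgt).filter (fun c =>
      PySem.Set.contains (PySem.Set.inter (PySem.Set.ofList res) (PySem.Set.ofList tgt)) c)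
      = ordOf tgt res := by
    unfold ordOf
    apply List.filter_congr
    intro b hb
    have hbt : b ∈ tgt := (PySem.List.mem_dedup tgt b).mp hb
    by_cases hr : b ∈ res
    · simp only [decide_eq_true hr]
      rw [PySem.Set.contains_iff, PySem.Set.mem_inter]
      exact ⟨by rwa [PySem.Set.mem_ofList], by rwa [PySem.Set.mem_ofList]⟩
    · simp only [decide_eq_false hr]
      rw [← Bool.not_eq_true, PySem.Set.contains_iff, PySem.Set.mem_inter]
      intro h
      exact hr ((PySem.Set.mem_ofList ..).mp h.1)
  rw [hord]
  exact scatter_go_eq_scat tgt res res (ordOf tgt res) (fun c hc => hc)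

-- ===== VERDICT (by name: the statement is the Claim_ definition above) =====
theorem compute_target_tensor_py_spec : Claim_equal_compute_target_tensor_py := by
  intro in0 in1 target rest _hdom hpre
  obtain ⟨h0, h1⟩ := hpre
  have hl0 : 1 ≤ in0.toList.length := by
    cases hx : in0.toList with
    | nil => exact absurd hx h0
    | cons y ys => simp
  have hl1 : 1 ≤ in1.toList.length := by
    cases hx : in1.toList with
    | nil => exact absurd hx h1
    | cons y ys => simp
  have e1 : PySem.List.pyGet? in1.toList (-1)
      = some (in1.toList[in1.toList.length - 1]'(by omega)) := by
    rw [PySem.List.pyGet?_neg_ofNat in1.toList 1 (by omega) hl1]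
    exact List.getElem?_eq_getElem (by omega)
  have e0 : PySem.List.pyGet? in0.toList (-1)
      = some (in0.toList[in0.toList.length - 1]'(by omega)) := by
    rw [PySem.List.pyGet?_neg_ofNat in0.toList 1 (by omega) hl0]
    exact List.getElem?_eq_getElem (by omega)
  unfold Spec_compute_target_tensor_py compute_target_tensor_py compute_target_tensor_py_alt
  simp only []
  rw [e1, e0]
  dsimp only
  rw [show ctpPhase1B = ctpPhase1 from rfl]
  rw [ctpSort_canon _ _ (phase1_nodup _ _), scatter_eq_scat]
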